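-- pv_equiv track=rewrite | github.com/TheSchwa1337/Schwabot_Base_Files | master_flake8_comprehensive_fixer.py | fix_whitespace_issues
-- ===== SOURCE A (Python) =====
-- def fix_whitespace_issues(content: str) -> str:
--     """Fix W291, W292, W293 whitespace issues."""
--     lines = content.split('\n')
--     fixed_lines = []
--
--     for line in lines:
--         # W291: trailing whitespace
--         # W293: blank line contains whitespace
--         cleaned_line = line.rstrip()
--         fixed_lines.append(cleaned_line)
--
--     # W292: no newline at end of file
--     content = '\n'.join(fixed_lines)
--     if content and not content.endswith('\n'):
--         content += '\n'
--
--     return content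
-- ===== SOURCE B (Python) =====
-- def fix_whitespace_issues(content: str) -> str:
--     """Fix W291, W292, W293 whitespace issues."""
--     # Single left-to-right pass with a pending-whitespace buffer: a run of
--     # non-newline whitespace is dropped when a '\n' (or end of string) follows,
--     # and flushed verbatim otherwise. No list of lines is ever materialised.
--     out = []
--     pend = []
--     for c in content:
--         if c == '\n':
--             pend.clear()
--             out.append('\n')
--         elif c in ' \t\r\x0b\x0c':
--             pend.append(c)
--         else:
--             out.extend(pend)
--             pend.clear()
--             out.append(c)
--     res = ''.join(out)
--     if res and not res.endswith('\n'):
--         res += '\n'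
--     return res
-- ===== Notes on version B (the rewrite author's own statement) =====
-- stated objective: alternative
-- what changed: Replaced the split-into-lines / per-line rstrip / join pipeline with a single character-level state machine that buffers runs of non-newline whitespace and drops them when a newline or end of string follows; no list of lines is built.
import Mathlib
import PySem

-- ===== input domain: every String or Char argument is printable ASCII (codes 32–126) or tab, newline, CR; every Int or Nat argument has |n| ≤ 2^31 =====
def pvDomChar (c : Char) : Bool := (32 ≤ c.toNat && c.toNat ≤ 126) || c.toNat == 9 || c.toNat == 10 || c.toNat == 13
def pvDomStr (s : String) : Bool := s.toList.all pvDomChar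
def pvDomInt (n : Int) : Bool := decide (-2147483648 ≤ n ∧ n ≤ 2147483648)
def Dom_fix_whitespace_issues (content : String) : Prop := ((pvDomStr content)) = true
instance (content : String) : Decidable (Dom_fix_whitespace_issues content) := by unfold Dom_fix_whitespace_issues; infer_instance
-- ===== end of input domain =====

-- B replaces the split/rstrip-per-line/join of A by one character-level scan with a
-- pending-whitespace buffer (alternative algorithm, same observable result).

-- ===== PORT A =====
def fix_whitespace_issues (content : String) : String :=
  let lines := PySem.Chars.splitOn content.toList ['\n']
  let fixed_lines := lines.foldl (fun acc line => acc ++ [PySem.Chars.rstrip line]) []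
  let c := PySem.Chars.join ['\n'] fixed_lines
  if c ≠ [] ∧ PySem.Chars.endswith c ['\n'] = false then String.ofList (c ++ ['\n'])
  else String.ofList c

-- ===== PORT B =====
def pvIsWS (c : Char) : Bool :=
  c = ' ' || c = '\t' || c = '\r' || c.toNat == 11 || c.toNat == 12

def pvScan : List Char → List Char → List Char
  | _, [] => []
  | pend, c :: rest =>
    if c = '\n' then '\n' :: pvScan [] rest
    else if pvIsWS c then pvScan (pend ++ [c]) rest
    else pend ++ c :: pvScan [] rest

def fix_whitespace_issues_alt (content : String) : String :=
  let r := pvScan [] content.toList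
  if r ≠ [] ∧ PySem.Chars.endswith r ['\n'] = false then String.ofList (r ++ ['\n'])
  else String.ofList r

-- ===== PRECONDITION & SPEC =====
def Spec_fix_whitespace_issues (content : String) (out : String) : Prop := out = fix_whitespace_issues_alt content
instance (content : String) (out : String) : Decidable (Spec_fix_whitespace_issues content out) := by unfold Spec_fix_whitespace_issues; infer_instance

-- ===== CLAIM (what is proved, stated in full; the proofs are below) =====
def Claim_equal_fix_whitespace_issues : Prop := ∀ (content : String), Dom_fix_whitespace_issues content → Spec_fix_whitespace_issues content (fix_whitespace_issues content)

-- ===== LEMMAS AND PROOFS =====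

-- spec of PySem.Chars.splitOn for the single-char separator '\n'
def pvS : List Char → List Char → List (List Char)
  | cur, [] => [cur]
  | cur, c :: rest => if c = '\n' then cur :: pvS [] rest else pvS (cur ++ [c]) rest

-- joint spec: '\n'-join of the rstripped pieces
def pvT : List Char → List Char → List Char
  | cur, [] => PySem.Chars.rstrip cur
  | cur, c :: rest =>
    if c = '\n' then PySem.Chars.rstrip cur ++ '\n' :: pvT [] rest else pvT (cur ++ [c]) rest

theorem char_eq_iff_toNat (c d : Char) : c = d ↔ c.toNat = d.toNat :=
  ⟨fun h => h ▸ rfl, fun h => Char.ext (UInt32.toNat_inj.mp h)⟩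

theorem pvS_ne_nil : ∀ (t cur : List Char), pvS cur t ≠ [] := by
  intro t
  induction t with
  | nil => intro cur; simp [pvS]
  | cons c rest ih =>
    intro cur
    simp only [pvS]
    split
    · simp
    · exact ih _

theorem go_spec : ∀ (fuel : Nat) (l cur : List Char) (accs : List (List Char)), l.length ≤ fuel →
      PySem.Chars.splitOn.go ['\n'] fuel l cur accs = accs.reverse ++ pvS cur.reverse l := by
  intro fuel
  induction fuel with
  | zero =>
    intro l cur accs hl
    have : l = [] := List.length_eq_zero_iff.mp (Nat.le_zero.mp hl)
    subst this
    simp [PySem.Chars.splitOn.go, pvS]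
  | succ n ih =>
    intro l cur accs hl
    cases l with
    | nil => simp [PySem.Chars.splitOn.go, pvS]
    | cons c rest =>
      by_cases hc : c = '\n'
      · subst hc
        have hstep : PySem.Chars.splitOn.go ['\n'] (n+1) ('\n'::rest) cur accs =
            PySem.Chars.splitOn.go ['\n'] n rest [] (cur.reverse :: accs) := by
          simp [PySem.Chars.splitOn.go, List.isPrefixOf]
        rw [hstep, ih rest [] (cur.reverse :: accs) (by simpa using Nat.le_of_succ_le_succ hl)]
        simp [pvS]
      · have hstep : PySem.Chars.splitOn.go ['\n'] (n+1) (c::rest) cur accs =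
            PySem.Chars.splitOn.go ['\n'] n rest (c :: cur) accs := by
          simp [PySem.Chars.splitOn.go, List.isPrefixOf, Ne.symm hc]
        rw [hstep, ih rest (c :: cur) accs (by simpa using Nat.le_of_succ_le_succ hl)]
        simp [pvS, hc]

theorem splitOn_eq_pvS (s : List Char) : PySem.Chars.splitOn s ['\n'] = pvS [] s := by
  have := go_spec (s.length + 1) s [] [] (by omega)
  simpa [PySem.Chars.splitOn] using this

theorem foldl_append_map (f : List Char → List Char) :
    ∀ (l : List (List Char)) (acc : List (List Char)),
      l.foldl (fun a x => a ++ [f x]) acc = acc ++ l.map f := by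
  intro l
  induction l with
  | nil => simp
  | cons x xs ih => intro acc; simp [List.foldl, ih]

theorem join_map_rstrip :
    ∀ (t cur : List Char),
      PySem.Chars.join ['\n'] ((pvS cur t).map PySem.Chars.rstrip) = pvT cur t := by
  intro t
  induction t with
  | nil => intro cur; simp [pvS, pvT, PySem.Chars.join, List.intercalate]
  | cons c rest ih =>
    intro cur
    by_cases hc : c = '\n'
    · subst hc
      simp only [pvS, pvT]
      obtain ⟨h, tl, hht⟩ : ∃ h tl, pvS ([] : List Char) rest = h :: tl := by
        cases hS : pvS ([] : List Char) rest with
        | nil => exact absurd hS (pvS_ne_nil rest [])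
        | cons h tl => exact ⟨h, tl, rfl⟩
      have := ih ([] : List Char)
      rw [hht] at this ⊢
      simp only [List.map_cons, PySem.Chars.join, List.intercalate] at this ⊢
      simp [← this]
    · simp only [pvS, pvT, if_neg hc]
      exact ih (cur ++ [c])

theorem dropWhile_append_of_not (p : Char → Bool) (c : Char) (hc : p c = false) :
    ∀ (a b : List Char), List.dropWhile p (a ++ c :: b) = List.dropWhile p a ++ c :: b := by
  intro a
  induction a with
  | nil => intro b; simp [List.dropWhile, hc]
  | cons x a' ih =>
    intro b
    by_cases hx : p x = true
    · simp [List.dropWhile, hx, ih]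
    · simp at hx; simp [List.dropWhile, hx]

theorem rstrip_append_cons (pend w : List Char) (c : Char)
    (hc : PySem.Chars.isspace c = false) :
    PySem.Chars.rstrip (pend ++ c :: w) = pend ++ c :: PySem.Chars.rstrip w := by
  simp [PySem.Chars.rstrip, dropWhile_append_of_not _ _ hc]

theorem rstrip_all_space (pend : List Char) (h : ∀ c ∈ pend, PySem.Chars.isspace c = true) :
    PySem.Chars.rstrip pend = [] := by
  have : List.dropWhile PySem.Chars.isspace pend.reverse = [] := by
    rw [List.dropWhile_eq_nil_iff]
    intro c hc; exact h c (List.mem_reverse.mp hc)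
  simp [PySem.Chars.rstrip, this]

theorem ws_isspace (c : Char) (h : pvIsWS c = true) : PySem.Chars.isspace c = true := by
  simp only [pvIsWS, Bool.or_eq_true, beq_iff_eq, decide_eq_true_eq, char_eq_iff_toNat,
    show (' ' : Char).toNat = 32 from rfl, show ('\t' : Char).toNat = 9 from rfl,
    show ('\r' : Char).toNat = 13 from rfl] at h
  simp only [PySem.Chars.isspace, Bool.or_eq_true, Bool.and_eq_true, decide_eq_true_eq]
  omega

theorem nonws_not_isspace (c : Char) (hd : pvDomChar c = true) (hn : c.toNat ≠ 10)
    (hw : pvIsWS c = false) : PySem.Chars.isspace c = false := by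
  simp only [pvDomChar, Bool.or_eq_true, Bool.and_eq_true, decide_eq_true_eq, beq_iff_eq] at hd
  simp only [pvIsWS, Bool.or_eq_false_iff, beq_eq_false_iff_ne, ne_eq, char_eq_iff_toNat,
    decide_eq_false_iff_not, show (' ' : Char).toNat = 32 from rfl,
    show ('\t' : Char).toNat = 9 from rfl, show ('\r' : Char).toNat = 13 from rfl] at hw
  simp only [PySem.Chars.isspace, Bool.or_eq_false_iff, Bool.and_eq_false_iff,
    decide_eq_false_iff_not]
  omega

theorem pvT_pull (rest : List Char) :
    ∀ (pend cur : List Char) (c : Char), PySem.Chars.isspace c = false →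
      pvT (pend ++ c :: cur) rest = pend ++ c :: pvT cur rest := by
  induction rest with
  | nil => intro pend cur c hc; simp [pvT, rstrip_append_cons _ _ _ hc]
  | cons d r ih =>
    intro pend cur c hc
    by_cases hd : d = '\n'
    · subst hd; simp [pvT, rstrip_append_cons _ _ _ hc]
    · have h1 : pend ++ c :: cur ++ [d] = pend ++ c :: (cur ++ [d]) := by simp
      simp only [pvT, if_neg hd]
      rw [h1, ih _ _ _ hc]

theorem scan_eq_pvT :
    ∀ (cs pend : List Char), (∀ c ∈ pend, pvIsWS c = true) → (∀ c ∈ cs, pvDomChar c = true) →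
      pvScan pend cs = pvT pend cs := by
  intro cs
  induction cs with
  | nil =>
    intro pend hp _
    simp [pvScan, pvT]
    exact rstrip_all_space pend (fun c hc => ws_isspace c (hp c hc))
  | cons c rest ih =>
    intro pend hp hd
    by_cases hc : c = '\n'
    · subst hc
      simp only [pvScan, pvT]
      rw [ih [] (by simp) (fun x hx => hd x (List.mem_cons_of_mem _ hx)),
          rstrip_all_space pend (fun x hx => ws_isspace x (hp x hx))]
      simp
    · by_cases hw : pvIsWS c = true
      · simp only [pvScan, pvT, if_neg hc, hw, if_pos]
        exact ih (pend ++ [c])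
          (fun x hx => by rcases List.mem_append.mp hx with h | h
                          · exact hp x h
                          · simp at h; subst h; exact hw)
          (fun x hx => hd x (List.mem_cons_of_mem _ hx))
      · simp at hw
        have hns : PySem.Chars.isspace c = false :=
          nonws_not_isspace c (hd c (List.mem_cons_self ..))
            (fun h => hc ((char_eq_iff_toNat c '\n').mpr h)) (by simp [hw])
        simp only [pvScan, pvT, if_neg hc, hw, if_neg, Bool.false_eq_true, not_false_eq_true]
        rw [ih [] (by simp) (fun x hx => hd x (List.mem_cons_of_mem _ hx))]
        have := pvT_pull rest pend [] c hns
        simpa using this.symm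

-- ===== VERDICT (by name: the statement is the Claim_ definition above) =====
theorem fix_whitespace_issues_spec : Claim_equal_fix_whitespace_issues := by
  intro content hdom
  unfold Spec_fix_whitespace_issues
  unfold fix_whitespace_issues fix_whitespace_issues_alt
  have hdom' : ∀ c ∈ content.toList, pvDomChar c = true := by
    have := hdom; unfold Dom_fix_whitespace_issues pvDomStr at this
    simpa [List.all_eq_true] using this
  have hcore :
      PySem.Chars.join ['\n']
        ((PySem.Chars.splitOn content.toList ['\n']).foldl
          (fun acc line => acc ++ [PySem.Chars.rstrip line]) []) = pvScan [] content.toList := by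
    rw [foldl_append_map, List.nil_append, splitOn_eq_pvS, join_map_rstrip,
        scan_eq_pvT content.toList [] (by simp) hdom']
  simp only [hcore]
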